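-- pv_equiv track=rewrite | github.com/tam1006/Atcoder-Beginner-Contest | problems/ABC/272/e/abc272_e.py | solve
-- ===== SOURCE A (Python) =====
-- import math
--
-- def solve(N, M, A):
--     nums = list(set() for _ in range(M+1))
--
--     for i in range(N):
--         j = max(1, math.ceil(-A[i]/(i+1)))
--         for k in range(j, M+1):
--             num = A[i] + k*(i+1)
--             if num > N:
--                 break
--             nums[k].add(num)
--
--     ans = []
--     for i in range(1, M+1):
--         for j in range(N+1):
--             if j not in nums[i]:
--                 ans.append(j)
--                 break
--
--     return ans
-- ===== SOURCE B (Python) =====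
-- def solve(N, M, A):
--     vals = [[] for _ in range(M + 1)]
--
--     for i in range(N):
--         step = i + 1
--         k = max(1, -(A[i] // step))  # exact ceiling of -A[i]/step via integer floor division
--         v = A[i] + k * step
--         while k <= M and v <= N:
--             vals[k].append(v)
--             k += 1
--             v += step
--
--     ans = []
--     for k in range(1, M + 1):
--         expected = 0
--         for v in sorted(vals[k]):
--             if v == expected:
--                 expected += 1
--         if expected <= N:
--             ans.append(expected)
--     return ans
-- ===== Notes on version B (the rewrite author's own statement) =====
-- stated objective: alternative
-- what changed: B builds plain per-k value lists with an integer while-loop (no float ceil, no hash sets) and replaces A's mex phase (scan 0..N testing set membership) by a walk over each sorted list with an 'expected' counter.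
import Mathlib
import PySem

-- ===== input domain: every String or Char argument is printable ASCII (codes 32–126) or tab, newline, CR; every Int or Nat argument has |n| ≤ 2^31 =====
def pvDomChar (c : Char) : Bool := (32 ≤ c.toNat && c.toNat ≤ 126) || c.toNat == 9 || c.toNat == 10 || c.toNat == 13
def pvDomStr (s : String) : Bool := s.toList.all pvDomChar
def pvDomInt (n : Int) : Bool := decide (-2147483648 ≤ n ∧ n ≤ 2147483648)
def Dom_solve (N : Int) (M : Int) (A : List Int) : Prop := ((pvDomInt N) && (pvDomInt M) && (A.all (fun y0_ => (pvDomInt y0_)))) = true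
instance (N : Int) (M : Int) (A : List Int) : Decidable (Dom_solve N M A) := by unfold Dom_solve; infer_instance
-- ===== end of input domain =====

-- B replaces A's per-k "scan 0..N against a hash set" mex phase by a walk over the sorted value
-- list with an 'expected' counter, and builds plain lists with an integer while-loop instead of
-- sets over an inner range (objective: alternative; equal return value proved below).

-- ===== PORT A =====
-- inner 'for k in range(j, M+1): … if num > N: break; nums[k].add(num)'
def solveInnerA (a ip1 N : Int) : List Int → List (PySem.Set Int) → List (PySem.Set Int)
  | [], nums => nums
  | k :: ks, nums =>
    let num := a + k * ip1
    if num > N then nums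
    else solveInnerA a ip1 N ks
      (PySem.List.pySetD nums k (PySem.Set.add (PySem.List.pyGetD nums k PySem.Set.empty) num))

-- 'for j in range(N+1): if j not in nums[i]: … break' — first j not in the set (none: no break)
def solveMexA (s : PySem.Set Int) : List Int → Option Int
  | [] => none
  | j :: js => if PySem.Set.contains s j then solveMexA s js else some j

def solve (N : Int) (M : Int) (A : List Int) : List Int :=
  -- nums = list(set() for _ in range(M+1))
  let nums0 : List (PySem.Set Int) := List.replicate (M + 1).toNat PySem.Set.empty
  let nums := (PySem.List.pyRange 0 N).foldl (fun nums i =>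
      -- A[i]: pyGetD is exact under Pre_solve (0 ≤ i < len(A))
      let a := PySem.List.pyGetD A i 0
      -- j = max(1, math.ceil(-A[i]/(i+1))): exact integer ceiling -(A[i]//(i+1)); CPython's
      -- float ceil agrees with it for |A[i]| ≤ 2^31 and the list lengths of the tested domain
      let j := max 1 (-(PySem.Int.floordiv a (i + 1)))
      solveInnerA a (i + 1) N (PySem.List.pyRange j (M + 1)) nums) nums0
  (PySem.List.pyRange 1 (M + 1)).foldl (fun ans i =>
      match solveMexA (PySem.List.pyGetD nums i PySem.Set.empty) (PySem.List.pyRange 0 (N + 1)) with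
      | some j => ans ++ [j]
      | none => ans) []

-- ===== PORT B =====
-- 'while k <= M and v <= N: vals[k].append(v); k += 1; v += step'
def solveInnerB (step M N : Int) (k v : Int) (vals : List (List Int)) : List (List Int) :=
  if _h : k ≤ M ∧ v ≤ N then
    solveInnerB step M N (k + 1) (v + step)
      (PySem.List.pySetD vals k (PySem.List.pyGetD vals k [] ++ [v]))
  else vals
termination_by (M + 1 - k).toNat
decreasing_by omega

def solve_alt (N : Int) (M : Int) (A : List Int) : List Int :=
  let vals0 : List (List Int) := List.replicate (M + 1).toNat []
  let vals := (PySem.List.pyRange 0 N).foldl (fun vals i =>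
      let a := PySem.List.pyGetD A i 0
      let step := i + 1
      let k := max 1 (-(PySem.Int.floordiv a step))
      solveInnerB step M N k (a + k * step) vals) vals0
  (PySem.List.pyRange 1 (M + 1)).foldl (fun ans k =>
      let expected := (PySem.List.sorted (PySem.List.pyGetD vals k []) (fun x => x)).foldl
          (fun e v => if v = e then e + 1 else e) 0
      if expected ≤ N then ans ++ [expected] else ans) []

-- ===== PRECONDITION & SPEC =====
-- A raises IndexError at A[i] exactly when N > len(A); that is all Pre_ excludes.
def Pre_solve (N : Int) (M : Int) (A : List Int) : Prop := N ≤ (A.length : Int)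
instance (N : Int) (M : Int) (A : List Int) : Decidable (Pre_solve N M A) := by unfold Pre_solve; infer_instance
def pvWitness_solve : Int × Int × List Int := (3, 3, [-1, 0, 2])

def Spec_solve (N : Int) (M : Int) (A : List Int) (out : List Int) : Prop := out = solve_alt N M A
instance (N : Int) (M : Int) (A : List Int) (out : List Int) : Decidable (Spec_solve N M A out) := by unfold Spec_solve; infer_instance

-- ===== CLAIM (what is proved, stated in full; the proofs are below) =====
def Claim_equal_solve : Prop := ∀ (N : Int) (M : Int) (A : List Int), Dom_solve N M A → Pre_solve N M A → Spec_solve N M A (solve N M A)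

-- ===== LEMMAS AND PROOFS =====

-- the build-phase invariant: same length, same membership at every index
def pvRel (ns vs : List (List Int)) : Prop :=
  ns.length = vs.length ∧ ∀ t : Nat, ∀ x : Int, x ∈ ns.getD t [] ↔ x ∈ vs.getD t []

lemma pv_getD_nonneg {α : Type} (xs : List α) (i : Int) (d : α) (h : 0 ≤ i) :
    PySem.List.pyGetD xs i d = xs.getD i.toNat d := by
  by_cases hi : i < (xs.length : Int)
  · simp [PySem.List.pyGetD, PySem.List.pyGet?, PySem.List.pyIdx?, h, hi, List.getD_eq_getElem?_getD]
  · simp [PySem.List.pyGetD, PySem.List.pyGet?, PySem.List.pyIdx?, h, hi, List.getD_eq_getElem?_getD]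

lemma pvRel_update (ns vs : List (List Int)) (h : pvRel ns vs) (k num : Int) (hk : 0 ≤ k) :
    pvRel (PySem.List.pySetD ns k (PySem.Set.add (PySem.List.pyGetD ns k PySem.Set.empty) num))
          (PySem.List.pySetD vs k (PySem.List.pyGetD vs k [] ++ [num])) := by
  obtain ⟨hl, hm⟩ := h
  rw [PySem.List.pySetD_of_nonneg _ _ hk, PySem.List.pySetD_of_nonneg _ _ hk,
      pv_getD_nonneg _ _ _ hk, pv_getD_nonneg _ _ _ hk]
  refine ⟨by simp [hl], ?_⟩
  intro t x
  simp only [List.getD_eq_getElem?_getD, List.getElem?_set]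
  by_cases ht : k.toNat = t
  · subst ht
    by_cases hlen : k.toNat < ns.length
    · have h1 := hm k.toNat x
      simp only [List.getD_eq_getElem?_getD] at h1
      simp only [if_true, if_pos hlen, if_pos (show k.toNat < vs.length from hl ▸ hlen),
        Option.getD_some, PySem.Set.mem_add, List.mem_append, List.mem_singleton]
      rw [show (PySem.Set.empty : List Int) = [] from rfl]
      tauto
    · simp only [if_true, if_neg hlen,
        if_neg (show ¬ k.toNat < vs.length from hl ▸ hlen), Option.getD_none]
  · simp only [if_neg ht]
    have h1 := hm t x
    simpa [List.getD_eq_getElem?_getD] using h1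

lemma pvInner_rel (a step N M : Int) :
    ∀ (n : Nat) (k : Int), (M + 1 - k).toNat = n → 0 ≤ k → ∀ ns vs, pvRel ns vs →
      pvRel (solveInnerA a step N (PySem.List.pyRange k (M + 1)) ns)
            (solveInnerB step M N k (a + k * step) vs) := by
  intro n
  induction n with
  | zero =>
    intro k hn hk0 ns vs h
    rw [PySem.List.pyRange_one_eq_nil (by omega), solveInnerA, solveInnerB,
      dif_neg (by omega : ¬(k ≤ M ∧ a + k * step ≤ N))]
    exact h
  | succ n ih =>
    intro k hn hk0 ns vs h
    have hkM : k ≤ M := by omega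
    rw [PySem.List.pyRange_one_cons (by omega : k < M + 1), solveInnerA, solveInnerB]
    by_cases hnum : a + k * step > N
    · rw [if_pos hnum, dif_neg (by omega : ¬(k ≤ M ∧ a + k * step ≤ N))]
      exact h
    · rw [if_neg hnum, dif_pos (by omega : k ≤ M ∧ a + k * step ≤ N),
        show a + k * step + step = a + (k + 1) * step by ring]
      exact ih (k + 1) (by omega) (by omega) _ _ (pvRel_update ns vs h k (a + k * step) hk0)

lemma pvFoldl_rel (l : List Int) (f g : List (List Int) → Int → List (List Int))
    (hfg : ∀ a b x, x ∈ l → pvRel a b → pvRel (f a x) (g b x)) :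
    ∀ a b, pvRel a b → pvRel (l.foldl f a) (l.foldl g b) := by
  induction l with
  | nil => intro a b h; simpa using h
  | cons hd tl ih =>
    intro a b h
    simp only [List.foldl_cons]
    exact ih (fun a b x hx => hfg a b x (List.mem_cons_of_mem _ hx))
      _ _ (hfg a b hd (List.mem_cons_self) h)

-- the sorted walk computes a value e with: everything in [start, e) is in s, e is not in s
lemma pvWalk_spec : ∀ (s : List Int), List.Pairwise (· ≤ ·) s → ∀ e : Int,
    e ≤ s.foldl (fun e v => if v = e then e + 1 else e) e ∧
    (∀ m, e ≤ m → m < s.foldl (fun e v => if v = e then e + 1 else e) e → m ∈ s) ∧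
    (s.foldl (fun e v => if v = e then e + 1 else e) e) ∉ s ∧
    (s.foldl (fun e v => if v = e then e + 1 else e) e = e ∨
     s.foldl (fun e v => if v = e then e + 1 else e) e - 1 ∈ s) := by
  intro s
  induction s with
  | nil =>
    intro _ e
    refine ⟨le_refl e, ?_, ?_, Or.inl rfl⟩
    · intro m hm1 hm2; simp only [List.foldl_nil] at hm2; omega
    · simp
  | cons v t ih =>
    intro hs e
    obtain ⟨hv, ht⟩ := List.pairwise_cons.mp hs
    simp only [List.foldl_cons]
    by_cases hve : v = e
    · subst hve
      rw [if_pos rfl]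
      obtain ⟨h1, h2, h3, h4⟩ := ih ht (v + 1)
      refine ⟨by omega, ?_, ?_, ?_⟩
      · intro m hm1 hm2
        by_cases hmv : m = v
        · exact hmv ▸ List.mem_cons_self
        · exact List.mem_cons_of_mem _ (h2 m (by omega) hm2)
      · simp only [List.mem_cons, not_or]
        exact ⟨by omega, h3⟩
      · rcases h4 with h | h
        · right; rw [h]; simp
        · right; exact List.mem_cons_of_mem _ h
    · rw [if_neg hve]
      obtain ⟨h1, h2, h3, h4⟩ := ih ht e
      refine ⟨h1, ?_, ?_, ?_⟩
      · intro m hm1 hm2; exact List.mem_cons_of_mem _ (h2 m hm1 hm2)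
      · simp only [List.mem_cons, not_or]
        refine ⟨?_, h3⟩
        rcases h4 with h | h
        · rw [h]; exact fun hc => hve hc.symm
        · have hvle := hv _ h; omega
      · rcases h4 with h | h
        · left; exact h
        · right; exact List.mem_cons_of_mem _ h

-- A's scan of 0..N against a set with that membership profile returns exactly the walk value
lemma pvMex_spec (S : List Int) (r b : Int) (hrS : r ∉ S)
    (hmem : ∀ m, 0 ≤ m → m < r → m ∈ S) :
    ∀ (n : Nat) (a : Int), (b - a).toNat = n → 0 ≤ a → a ≤ r →
      solveMexA S (PySem.List.pyRange a b) = if r < b then some r else none := by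
  intro n
  induction n with
  | zero =>
    intro a hn ha0 har
    rw [PySem.List.pyRange_one_eq_nil (by omega), solveMexA]
    simp only [if_neg (by omega : ¬ r < b)]
  | succ n ih =>
    intro a hn ha0 har
    rw [PySem.List.pyRange_one_cons (by omega : a < b), solveMexA]
    by_cases har' : a = r
    · subst har'
      rw [if_neg (fun hc => hrS ((PySem.Set.contains_iff S a).mp hc))]
      rw [if_pos (by omega : a < b)]
    · have haS : a ∈ S := hmem a ha0 (by omega)
      rw [if_pos ((PySem.Set.contains_iff S a).mpr haS)]
      exact ih (a + 1) (by omega) (by omega) (by omega)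

-- ===== VERDICT (by name: the statement is the Claim_ definition above) =====
theorem solve_spec : Claim_equal_solve := by
  intro N M A _ _
  show solve N M A = solve_alt N M A
  simp only [solve, solve_alt]
  have hrel : pvRel
      ((PySem.List.pyRange 0 N).foldl (fun nums i =>
        solveInnerA (PySem.List.pyGetD A i 0) (i + 1) N
          (PySem.List.pyRange (max 1 (-(PySem.Int.floordiv (PySem.List.pyGetD A i 0) (i + 1)))) (M + 1)) nums)
        (List.replicate (M + 1).toNat PySem.Set.empty))
      ((PySem.List.pyRange 0 N).foldl (fun vals i =>
        solveInnerB (i + 1) M N (max 1 (-(PySem.Int.floordiv (PySem.List.pyGetD A i 0) (i + 1))))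
          (PySem.List.pyGetD A i 0 + (max 1 (-(PySem.Int.floordiv (PySem.List.pyGetD A i 0) (i + 1)))) * (i + 1)) vals)
        (List.replicate (M + 1).toNat [])) := by
    apply pvFoldl_rel
    · intro ns vs i _ h
      exact pvInner_rel (PySem.List.pyGetD A i 0) (i + 1) N M _ _ rfl (by omega) ns vs h
    · exact ⟨rfl, fun t x => Iff.rfl⟩
  apply PySem.List.foldl_congr_mem'
  intro i hi ans
  have hi1 : 1 ≤ i := (PySem.List.mem_pyRange_one.mp hi).1
  set S := PySem.List.pyGetD
      ((PySem.List.pyRange 0 N).foldl (fun nums i =>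
        solveInnerA (PySem.List.pyGetD A i 0) (i + 1) N
          (PySem.List.pyRange (max 1 (-(PySem.Int.floordiv (PySem.List.pyGetD A i 0) (i + 1)))) (M + 1)) nums)
        (List.replicate (M + 1).toNat PySem.Set.empty)) i PySem.Set.empty with hSdef
  set L := PySem.List.pyGetD
      ((PySem.List.pyRange 0 N).foldl (fun vals i =>
        solveInnerB (i + 1) M N (max 1 (-(PySem.Int.floordiv (PySem.List.pyGetD A i 0) (i + 1))))
          (PySem.List.pyGetD A i 0 + (max 1 (-(PySem.Int.floordiv (PySem.List.pyGetD A i 0) (i + 1)))) * (i + 1)) vals)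
        (List.replicate (M + 1).toNat [])) i [] with hLdef
  have hSL : ∀ x : Int, x ∈ S ↔ x ∈ L := by
    intro x
    rw [hSdef, hLdef, pv_getD_nonneg _ _ _ (by omega), pv_getD_nonneg _ _ _ (by omega)]
    exact hrel.2 i.toNat x
  obtain ⟨hw0, hwmem, hwnot, -⟩ :=
    pvWalk_spec (PySem.List.sorted L (fun x => x)) (PySem.List.sorted_pairwise L (fun x => x)) 0
  set e := (PySem.List.sorted L (fun x => x)).foldl (fun e v => if v = e then e + 1 else e) 0 with hedef
  have hmex : solveMexA S (PySem.List.pyRange 0 (N + 1)) = if e < N + 1 then some e else none := by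
    apply pvMex_spec S e (N + 1)
    · intro heS
      exact hwnot ((PySem.List.mem_sorted L (fun x => x) false e).mpr ((hSL e).mp heS))
    · intro m hm0 hme
      exact (hSL m).mpr ((PySem.List.mem_sorted L (fun x => x) false m).mp (hwmem m hm0 hme))
    · rfl
    · omega
    · omega
  rw [hmex]
  by_cases heN : e ≤ N
  · simp only [if_pos (by omega : e < N + 1), if_pos heN]
  · simp only [if_neg (by omega : ¬ e < N + 1), if_neg heN]
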